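-- pv_equiv track=rewrite | github.com/liuxuf112/cs362_finalProject | task.py | generate_int
-- ===== SOURCE A (Python) =====
-- def generate_int(int_string):
--     """ Converts string int to int and returns it. """
--     # If number is negative, strips it out before processing.
--     is_negative = False
--     if int_string[0] == '-':
--         is_negative = True
--         int_string = int_string[1:]
--         # Edge case when - doesn't have another number with it.
--         if int_string == "":
--             return None
--
--     # Processes string from right to left, updating integer from least to most significant digit.
--     num_int = 0
--     for index, value in enumerate(int_string[::-1]):
--         num_int = process_character_int(index, value, num_int)
--         if num_int is None:
--             return None
--
--     # Adds the negative sign back on before returning.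
--     if is_negative:
--         return num_int * -1
--     else:
--         return num_int
--
-- def process_character_int(some_index, some_character, some_int):
--     """ Updates given int value if character is valid int. """
--     for index, digit in enumerate(range(10)):
--         if some_character == str(digit):
--             some_int += digit * (10 ** some_index)
--             return some_int
--
--     return None
-- ===== SOURCE B (Python) =====
-- def generate_int(int_string):
--     """ Converts string int to int and returns it. """
--     is_negative = int_string[0] == '-'
--     digits = int_string[1:] if is_negative else int_string
--     if digits == "":
--         return None
--     # Left-to-right Horner accumulation: num = num*10 + digit.
--     num = 0
--     for ch in digits:
--         if '0' <= ch <= '9':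
--             num = num * 10 + (ord(ch) - 48)
--         else:
--             return None
--     return -num if is_negative else num
-- ===== Notes on version B (the rewrite author's own statement) =====
-- stated objective: simpler
-- what changed: Replaces the right-to-left reversal with per-index 10**index powers and the inner 10-way string-comparison loop by a single left-to-right Horner pass (num = num*10 + digit) with an ordinal range check.
import Mathlib
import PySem

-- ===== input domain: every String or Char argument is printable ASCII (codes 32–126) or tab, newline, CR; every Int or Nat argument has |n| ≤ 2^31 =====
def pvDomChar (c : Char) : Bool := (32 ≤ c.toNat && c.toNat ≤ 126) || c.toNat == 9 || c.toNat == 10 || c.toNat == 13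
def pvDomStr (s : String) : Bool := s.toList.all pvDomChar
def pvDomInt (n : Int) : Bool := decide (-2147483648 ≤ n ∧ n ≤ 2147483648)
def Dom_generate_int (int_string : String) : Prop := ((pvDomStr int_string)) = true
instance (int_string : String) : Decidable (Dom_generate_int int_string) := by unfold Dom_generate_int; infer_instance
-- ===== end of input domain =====

-- B replaces A's right-to-left pass with 10**index powers and a 10-way per-character
-- string-comparison loop by a single left-to-right Horner pass (num = num*10 + digit).

-- ===== PORT A =====
-- inner loop of process_character_int: 'for index, digit in enumerate(range(10)): if some_character == str(digit): ...'
def pciLoop (ds : List Int) (some_index : Nat) (some_character : Char) (some_int : Int) : Option Int :=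
  match ds with
  | [] => none
  | d :: rest =>
      if String.ofList [some_character] = PySem.Int.toStr d then
        some (some_int + d * (10 : Int) ^ some_index)
      else pciLoop rest some_index some_character some_int

def process_character_int (some_index : Nat) (some_character : Char) (some_int : Int) : Option Int :=
  pciLoop (PySem.List.pyRange 0 10 1) some_index some_character some_int

-- 'for index, value in enumerate(int_string[::-1]): num_int = process_character_int(...); if num_int is None: return None'
def genLoop (l : List (Nat × Char)) (num_int : Int) : Option Int :=
  match l with
  | [] => some num_int
  | (i, c) :: rest =>
      match process_character_int i c num_int with
      | none => none
      | some n' => genLoop rest n'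

-- indexes the reversed character list from 0 (Python's enumerate)
def enumFrom (k : Nat) : List Char → List (Nat × Char)
  | [] => []
  | c :: cs => (k, c) :: enumFrom (k + 1) cs

def generate_int (int_string : String) : Option Int :=
  match int_string.toList with
  | [] => none   -- Python raises IndexError on int_string[0]; excluded by Pre_generate_int
  | c0 :: rest =>
      if c0 = '-' then
        if rest = [] then none
        else
          match genLoop (enumFrom 0 rest.reverse) 0 with
          | none => none
          | some n => some (n * -1)
      else genLoop (enumFrom 0 (c0 :: rest).reverse) 0

-- ===== PORT B =====
-- left-to-right Horner pass: num = num*10 + digit, early None on a non-digit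
def horner (cs : List Char) (num : Int) : Option Int :=
  match cs with
  | [] => some num
  | c :: rest =>
      if '0' ≤ c ∧ c ≤ '9' then horner rest (num * 10 + ((c.toNat : Int) - 48))
      else none

def generate_int_alt (int_string : String) : Option Int :=
  match int_string.toList with
  | [] => none   -- Python raises IndexError on int_string[0]; excluded by Pre_generate_int
  | c0 :: rest =>
      let isNeg := c0 = '-'
      let digits := if isNeg then rest else c0 :: rest
      if digits = [] then none
      else
        match horner digits 0 with
        | none => none
        | some n => some (if isNeg then -n else n)

-- ===== PRECONDITION & SPEC =====
-- Pre_ excludes only the empty string, on which A raises IndexError at int_string[0].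
def Pre_generate_int (int_string : String) : Prop := int_string ≠ ""
instance (int_string : String) : Decidable (Pre_generate_int int_string) := by
  unfold Pre_generate_int; infer_instance
def pvWitness_generate_int : String := "-12"

def Spec_generate_int (int_string : String) (out : Option Int) : Prop := out = generate_int_alt int_string
instance (int_string : String) (out : Option Int) : Decidable (Spec_generate_int int_string out) := by unfold Spec_generate_int; infer_instance

-- ===== CLAIM (what is proved, stated in full; the proofs are below) =====
def Claim_equal_generate_int : Prop := ∀ (int_string : String), Dom_generate_int int_string → Pre_generate_int int_string → Spec_generate_int int_string (generate_int int_string)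

-- ===== LEMMAS AND PROOFS =====

-- digit value of a character, shared characterisation of both loops
def dig? (c : Char) : Option Int :=
  if '0' ≤ c ∧ c ≤ '9' then some ((c.toNat : Int) - 48) else none

-- value of a digit string read least-significant-first (the order A processes it)
def revVal : List Char → Option Int
  | [] => some 0
  | c :: cs =>
      match dig? c, revVal cs with
      | some d, some v => some (d + 10 * v)
      | _, _ => none

lemma ofList_singleton_inj (c d : Char) :
    (String.ofList [c] = String.ofList [d]) ↔ c = d := by
  constructor
  · intro h
    have h' := congrArg String.toList h
    rw [String.toList_ofList, String.toList_ofList] at h'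
    exact List.singleton_inj.mp h'
  · rintro rfl; rfl

lemma pci_eq (i : Nat) (c : Char) (n : Int) :
    process_character_int i c n = (dig? c).map (fun d => n + d * (10 : Int) ^ i) := by
  unfold process_character_int
  rw [show PySem.List.pyRange 0 10 1 = [0, 1, 2, 3, 4, 5, 6, 7, 8, 9] from by decide]
  simp only [pciLoop,
    show PySem.Int.toStr 0 = String.ofList ['0'] from by decide,
    show PySem.Int.toStr 1 = String.ofList ['1'] from by decide,
    show PySem.Int.toStr 2 = String.ofList ['2'] from by decide,
    show PySem.Int.toStr 3 = String.ofList ['3'] from by decide,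
    show PySem.Int.toStr 4 = String.ofList ['4'] from by decide,
    show PySem.Int.toStr 5 = String.ofList ['5'] from by decide,
    show PySem.Int.toStr 6 = String.ofList ['6'] from by decide,
    show PySem.Int.toStr 7 = String.ofList ['7'] from by decide,
    show PySem.Int.toStr 8 = String.ofList ['8'] from by decide,
    show PySem.Int.toStr 9 = String.ofList ['9'] from by decide,
    ofList_singleton_inj]
  by_cases h0 : c = '0'
  · subst h0
    simp only [dig?]
    rw [if_pos (by decide : ('0':Char) ≤ '0' ∧ ('0':Char) ≤ '9')]
    rw [if_pos trivial]
    norm_num [show (('0').toNat : Int) = 48 from by decide]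
  by_cases h1 : c = '1'
  · subst h1
    simp only [dig?]
    rw [if_pos (by decide : ('0':Char) ≤ '1' ∧ ('1':Char) ≤ '9')]
    rw [if_neg (by decide : ¬(('1':Char) = '0'))]
    rw [if_pos trivial]
    norm_num [show (('1').toNat : Int) = 49 from by decide]
  by_cases h2 : c = '2'
  · subst h2
    simp only [dig?]
    rw [if_pos (by decide : ('0':Char) ≤ '2' ∧ ('2':Char) ≤ '9')]
    rw [if_neg (by decide : ¬(('2':Char) = '0'))]
    rw [if_neg (by decide : ¬(('2':Char) = '1'))]
    rw [if_pos trivial]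
    norm_num [show (('2').toNat : Int) = 50 from by decide]
  by_cases h3 : c = '3'
  · subst h3
    simp only [dig?]
    rw [if_pos (by decide : ('0':Char) ≤ '3' ∧ ('3':Char) ≤ '9')]
    rw [if_neg (by decide : ¬(('3':Char) = '0'))]
    rw [if_neg (by decide : ¬(('3':Char) = '1'))]
    rw [if_neg (by decide : ¬(('3':Char) = '2'))]
    rw [if_pos trivial]
    norm_num [show (('3').toNat : Int) = 51 from by decide]
  by_cases h4 : c = '4'
  · subst h4
    simp only [dig?]
    rw [if_pos (by decide : ('0':Char) ≤ '4' ∧ ('4':Char) ≤ '9')]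
    rw [if_neg (by decide : ¬(('4':Char) = '0'))]
    rw [if_neg (by decide : ¬(('4':Char) = '1'))]
    rw [if_neg (by decide : ¬(('4':Char) = '2'))]
    rw [if_neg (by decide : ¬(('4':Char) = '3'))]
    rw [if_pos trivial]
    norm_num [show (('4').toNat : Int) = 52 from by decide]
  by_cases h5 : c = '5'
  · subst h5
    simp only [dig?]
    rw [if_pos (by decide : ('0':Char) ≤ '5' ∧ ('5':Char) ≤ '9')]
    rw [if_neg (by decide : ¬(('5':Char) = '0'))]
    rw [if_neg (by decide : ¬(('5':Char) = '1'))]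
    rw [if_neg (by decide : ¬(('5':Char) = '2'))]
    rw [if_neg (by decide : ¬(('5':Char) = '3'))]
    rw [if_neg (by decide : ¬(('5':Char) = '4'))]
    rw [if_pos trivial]
    norm_num [show (('5').toNat : Int) = 53 from by decide]
  by_cases h6 : c = '6'
  · subst h6
    simp only [dig?]
    rw [if_pos (by decide : ('0':Char) ≤ '6' ∧ ('6':Char) ≤ '9')]
    rw [if_neg (by decide : ¬(('6':Char) = '0'))]
    rw [if_neg (by decide : ¬(('6':Char) = '1'))]
    rw [if_neg (by decide : ¬(('6':Char) = '2'))]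
    rw [if_neg (by decide : ¬(('6':Char) = '3'))]
    rw [if_neg (by decide : ¬(('6':Char) = '4'))]
    rw [if_neg (by decide : ¬(('6':Char) = '5'))]
    rw [if_pos trivial]
    norm_num [show (('6').toNat : Int) = 54 from by decide]
  by_cases h7 : c = '7'
  · subst h7
    simp only [dig?]
    rw [if_pos (by decide : ('0':Char) ≤ '7' ∧ ('7':Char) ≤ '9')]
    rw [if_neg (by decide : ¬(('7':Char) = '0'))]
    rw [if_neg (by decide : ¬(('7':Char) = '1'))]
    rw [if_neg (by decide : ¬(('7':Char) = '2'))]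
    rw [if_neg (by decide : ¬(('7':Char) = '3'))]
    rw [if_neg (by decide : ¬(('7':Char) = '4'))]
    rw [if_neg (by decide : ¬(('7':Char) = '5'))]
    rw [if_neg (by decide : ¬(('7':Char) = '6'))]
    rw [if_pos trivial]
    norm_num [show (('7').toNat : Int) = 55 from by decide]
  by_cases h8 : c = '8'
  · subst h8
    simp only [dig?]
    rw [if_pos (by decide : ('0':Char) ≤ '8' ∧ ('8':Char) ≤ '9')]
    rw [if_neg (by decide : ¬(('8':Char) = '0'))]
    rw [if_neg (by decide : ¬(('8':Char) = '1'))]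
    rw [if_neg (by decide : ¬(('8':Char) = '2'))]
    rw [if_neg (by decide : ¬(('8':Char) = '3'))]
    rw [if_neg (by decide : ¬(('8':Char) = '4'))]
    rw [if_neg (by decide : ¬(('8':Char) = '5'))]
    rw [if_neg (by decide : ¬(('8':Char) = '6'))]
    rw [if_neg (by decide : ¬(('8':Char) = '7'))]
    rw [if_pos trivial]
    norm_num [show (('8').toNat : Int) = 56 from by decide]
  by_cases h9 : c = '9'
  · subst h9
    simp only [dig?]
    rw [if_pos (by decide : ('0':Char) ≤ '9' ∧ ('9':Char) ≤ '9')]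
    rw [if_neg (by decide : ¬(('9':Char) = '0'))]
    rw [if_neg (by decide : ¬(('9':Char) = '1'))]
    rw [if_neg (by decide : ¬(('9':Char) = '2'))]
    rw [if_neg (by decide : ¬(('9':Char) = '3'))]
    rw [if_neg (by decide : ¬(('9':Char) = '4'))]
    rw [if_neg (by decide : ¬(('9':Char) = '5'))]
    rw [if_neg (by decide : ¬(('9':Char) = '6'))]
    rw [if_neg (by decide : ¬(('9':Char) = '7'))]
    rw [if_neg (by decide : ¬(('9':Char) = '8'))]
    rw [if_pos trivial]
    norm_num [show (('9').toNat : Int) = 57 from by decide]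
  have hnd : ¬('0' ≤ c ∧ c ≤ '9') := by
    rintro ⟨hlo, hhi⟩
    have ha : 48 ≤ c.toNat := Nat.succ_le_of_lt hlo
    have hb : c.toNat ≤ 57 := Fin.mk_le_mk.mp hhi
    have hn0 : c.toNat ≠ 48 := fun hh => h0 (Char.ext (UInt32.toNat_inj.mp (hh.trans (by decide))))
    have hn1 : c.toNat ≠ 49 := fun hh => h1 (Char.ext (UInt32.toNat_inj.mp (hh.trans (by decide))))
    have hn2 : c.toNat ≠ 50 := fun hh => h2 (Char.ext (UInt32.toNat_inj.mp (hh.trans (by decide))))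
    have hn3 : c.toNat ≠ 51 := fun hh => h3 (Char.ext (UInt32.toNat_inj.mp (hh.trans (by decide))))
    have hn4 : c.toNat ≠ 52 := fun hh => h4 (Char.ext (UInt32.toNat_inj.mp (hh.trans (by decide))))
    have hn5 : c.toNat ≠ 53 := fun hh => h5 (Char.ext (UInt32.toNat_inj.mp (hh.trans (by decide))))
    have hn6 : c.toNat ≠ 54 := fun hh => h6 (Char.ext (UInt32.toNat_inj.mp (hh.trans (by decide))))
    have hn7 : c.toNat ≠ 55 := fun hh => h7 (Char.ext (UInt32.toNat_inj.mp (hh.trans (by decide))))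
    have hn8 : c.toNat ≠ 56 := fun hh => h8 (Char.ext (UInt32.toNat_inj.mp (hh.trans (by decide))))
    have hn9 : c.toNat ≠ 57 := fun hh => h9 (Char.ext (UInt32.toNat_inj.mp (hh.trans (by decide))))
    omega
  simp only [if_neg h0, if_neg h1, if_neg h2, if_neg h3, if_neg h4, if_neg h5, if_neg h6, if_neg h7, if_neg h8, if_neg h9, dig?, if_neg hnd, Option.map_none]

lemma genLoop_eq (cs : List Char) (k : Nat) (n : Int) :
    genLoop (enumFrom k cs) n = (revVal cs).map (fun v => n + v * (10 : Int) ^ k) := by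
  induction cs generalizing k n with
  | nil => simp [enumFrom, genLoop, revVal]
  | cons c cs ih =>
      simp only [enumFrom, genLoop, revVal, pci_eq]
      cases hd : dig? c with
      | none => simp
      | some d =>
          simp only [Option.map_some]
          rw [ih]
          cases hv : revVal cs with
          | none => simp
          | some v => simp; ring

lemma revVal_append_singleton (cs : List Char) (c : Char) :
    revVal (cs ++ [c]) =
      match revVal cs, dig? c with
      | some v, some d => some (v + d * (10 : Int) ^ cs.length)
      | _, _ => none := by
  induction cs with
  | nil => cases hd : dig? c <;> simp [revVal, hd]
  | cons c' cs ih =>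
      simp only [List.cons_append, revVal, ih]
      cases hd' : dig? c' with
      | none => simp
      | some d' =>
          cases hv : revVal cs with
          | none => cases dig? c <;> simp
          | some v =>
              cases hd : dig? c with
              | none => simp
              | some d => simp [List.length_cons, pow_succ]; ring

lemma horner_eq (cs : List Char) (n : Int) :
    horner cs n = (revVal cs.reverse).map (fun v => n * (10 : Int) ^ cs.length + v) := by
  induction cs generalizing n with
  | nil => simp [horner, revVal]
  | cons c cs ih =>
      simp only [horner, List.reverse_cons, revVal_append_singleton]
      by_cases h : '0' ≤ c ∧ c ≤ '9'
      · rw [if_pos h, ih]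
        have hd : dig? c = some ((c.toNat : Int) - 48) := by simp [dig?, h]
        rw [hd]
        cases hv : revVal cs.reverse with
        | none => simp
        | some v =>
            simp [List.length_reverse, List.length_cons, pow_succ]; ring
      · rw [if_neg h]
        have hd : dig? c = none := by simp [dig?, h]
        rw [hd]
        cases revVal cs.reverse <;> simp

lemma loops_agree (cs : List Char) :
    genLoop (enumFrom 0 cs.reverse) 0 = horner cs 0 := by
  rw [genLoop_eq, horner_eq]
  cases revVal cs.reverse <;> simp

-- ===== VERDICT (by name: the statement is the Claim_ definition above) =====
theorem generate_int_spec : Claim_equal_generate_int := by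
  intro s _ hpre
  unfold Spec_generate_int generate_int generate_int_alt
  cases hl : s.toList with
  | nil => exact absurd (String.toList_eq_nil_iff.mp hl) hpre
  | cons c0 rest =>
      by_cases hneg : c0 = '-'
      · subst hneg
        dsimp only
        by_cases hr : rest = []
        · subst hr; rfl
        · rw [loops_agree rest]
          cases hh : horner rest 0 with
          | none => simp [hh, hr]
          | some n =>
              have hmn : n * -1 = -n := by ring
              simp [hmn, hh, hr]
      · dsimp only
        simp only [if_neg hneg]
        rw [loops_agree (c0 :: rest)]
        cases horner (c0 :: rest) 0 with
        | none => simp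
        | some n => simp
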